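-- pv_equiv track=rewrite | github.com/heiniglab/scPower-Cell-Atlas | Web-Server/R-Vue/app.py | extract_and_filter
-- ===== SOURCE A (Python) =====
-- def extract_and_filter(celltypes, assay_filter=None, tissue_filter=None):
--     assays = set()
--     tissues = set()
--     filtered_celltypes = celltypes
--
--     if assay_filter and assay_filter != "All":
--         filtered_celltypes = [ct for ct in filtered_celltypes if ct.startswith(assay_filter)]
--
--     if tissue_filter and tissue_filter != "All":
--         filtered_celltypes = [ct for ct in filtered_celltypes if ct.split('_')[1] == tissue_filter]
--
--     for celltype in celltypes:
--         parts = celltype.split('_')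
--         if len(parts) >= 3:
--             assays.add(parts[0])
--             tissues.add(parts[1])
--
--     return sorted(list(assays)), sorted(list(tissues)), filtered_celltypes
-- ===== SOURCE B (Python) =====
-- def extract_and_filter(celltypes, assay_filter=None, tissue_filter=None):
--     # Single pass over celltypes building assays, tissues and the filtered list together.
--     # (A returns the input list object itself when no filter applies; B returns a fresh
--     # equal list -- return values are identical.)
--     assay_on = bool(assay_filter) and assay_filter != "All"
--     tissue_on = bool(tissue_filter) and tissue_filter != "All"
--     assays, tissues, filtered = set(), set(), []
--     for ct in celltypes:
--         parts = ct.split('_')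
--         if len(parts) >= 3:
--             assays.add(parts[0])
--             tissues.add(parts[1])
--         if (not assay_on or ct.startswith(assay_filter)) and \
--            (not tissue_on or parts[1] == tissue_filter):
--             filtered.append(ct)
--     return sorted(assays), sorted(tissues), filtered
-- ===== Notes on version B (the rewrite author's own statement) =====
-- stated objective: simpler
-- what changed: A's two sequential filter comprehensions plus a separate set-building loop are fused into a single pass over celltypes that maintains assays, tissues and the filtered list together.
import Mathlib
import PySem

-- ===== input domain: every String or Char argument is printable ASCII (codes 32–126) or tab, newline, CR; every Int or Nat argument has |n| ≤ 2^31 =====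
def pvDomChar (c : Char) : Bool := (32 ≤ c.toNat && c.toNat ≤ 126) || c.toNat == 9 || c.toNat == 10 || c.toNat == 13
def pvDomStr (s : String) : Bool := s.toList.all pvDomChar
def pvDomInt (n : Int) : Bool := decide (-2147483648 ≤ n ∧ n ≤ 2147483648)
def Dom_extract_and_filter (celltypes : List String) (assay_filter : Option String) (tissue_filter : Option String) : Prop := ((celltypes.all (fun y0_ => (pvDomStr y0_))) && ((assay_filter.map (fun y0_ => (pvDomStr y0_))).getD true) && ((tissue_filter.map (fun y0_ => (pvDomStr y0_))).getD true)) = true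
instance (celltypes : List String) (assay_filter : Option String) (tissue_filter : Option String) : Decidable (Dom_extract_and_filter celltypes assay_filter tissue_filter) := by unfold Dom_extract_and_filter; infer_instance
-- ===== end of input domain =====

-- B fuses A's two filter comprehensions and its set-building loop into one pass over celltypes;
-- return values are proved equal (A may return the input list object itself, B an equal fresh list).

-- shared helpers mirroring the Python snippets both programs share
-- ct.split('_'): the separator is the literal "_" (never empty), so split? is always some
def pvSplitU (s : String) : List String := (PySem.Str.split? s "_").getD []

-- 'assay_filter and assay_filter != "All"' : truthy = some non-empty string
def pvAssayOn (assay_filter : Option String) : Bool :=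
  match assay_filter with
  | none => false
  | some a => !(a == "") && !(a == "All")

def pvTissueOn (tissue_filter : Option String) : Bool :=
  match tissue_filter with
  | none => false
  | some t => !(t == "") && !(t == "All")

-- ===== PORT A =====
-- body of A's 'for celltype in celltypes' set-building loop
def pvStepA (st : PySem.Set String × PySem.Set String) (ct : String) :
    PySem.Set String × PySem.Set String :=
  let parts := pvSplitU ct
  if 3 ≤ parts.length then
    (PySem.Set.add st.1 (PySem.List.pyGetD parts 0 ""),
     PySem.Set.add st.2 (PySem.List.pyGetD parts 1 ""))
  else st

def extract_and_filter (celltypes : List String) (assay_filter : Option String) (tissue_filter : Option String) : List String × List String × List String :=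
  -- filtered_celltypes = celltypes, then the two guarded comprehensions
  let f1 : List String :=
    if pvAssayOn assay_filter then
      celltypes.filter (fun ct => PySem.Str.startswith ct (assay_filter.getD ""))
    else celltypes
  let f2 : List String :=
    if pvTissueOn tissue_filter then
      -- ct.split('_')[1]; index 1 exists on every admitted input (Pre_), pyGetD totalises
      f1.filter (fun ct => PySem.List.pyGetD (pvSplitU ct) 1 "" == tissue_filter.getD "")
    else f1
  let st := celltypes.foldl pvStepA (PySem.Set.empty, PySem.Set.empty)
  (PySem.List.sorted st.1 (fun x => x) false, PySem.List.sorted st.2 (fun x => x) false, f2)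

-- ===== PORT B =====
-- the 'if ... : filtered.append(ct)' condition of B's single loop
def pvKeep (assayOn tissueOn : Bool) (a t : String) (ct : String) : Bool :=
  (!assayOn || PySem.Str.startswith ct a) &&
  (!tissueOn || PySem.List.pyGetD (pvSplitU ct) 1 "" == t)

-- body of B's single loop: update the two sets, then conditionally append to filtered
def pvStepB (assayOn tissueOn : Bool) (a t : String)
    (st : PySem.Set String × PySem.Set String × List String) (ct : String) :
    PySem.Set String × PySem.Set String × List String :=
  let parts := pvSplitU ct
  let st2 :=
    if 3 ≤ parts.length then
      (PySem.Set.add st.1 (PySem.List.pyGetD parts 0 ""),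
       PySem.Set.add st.2.1 (PySem.List.pyGetD parts 1 ""), st.2.2)
    else st
  if pvKeep assayOn tissueOn a t ct then (st2.1, st2.2.1, st2.2.2 ++ [ct]) else st2

def extract_and_filter_alt (celltypes : List String) (assay_filter : Option String) (tissue_filter : Option String) : List String × List String × List String :=
  let st := celltypes.foldl
    (pvStepB (pvAssayOn assay_filter) (pvTissueOn tissue_filter)
      (assay_filter.getD "") (tissue_filter.getD ""))
    (PySem.Set.empty, PySem.Set.empty, [])
  (PySem.List.sorted st.1 (fun x => x) false, PySem.List.sorted st.2.1 (fun x => x) false, st.2.2)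

-- ===== PRECONDITION & SPEC =====
-- Pre_ excludes exactly the inputs where Python A (and B) raises IndexError: an active tissue
-- filter reaching, after the assay filter, a celltype whose split on '_' has fewer than 2 parts.
def Pre_extract_and_filter (celltypes : List String) (assay_filter : Option String) (tissue_filter : Option String) : Prop :=
  pvTissueOn tissue_filter = true →
    ∀ ct ∈ celltypes,
      (pvAssayOn assay_filter = true → PySem.Str.startswith ct (assay_filter.getD "") = true) →
      2 ≤ (pvSplitU ct).length

instance (celltypes : List String) (assay_filter : Option String) (tissue_filter : Option String) : Decidable (Pre_extract_and_filter celltypes assay_filter tissue_filter) := by unfold Pre_extract_and_filter; infer_instance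

def pvWitness_extract_and_filter : List String × Option String × Option String :=
  (["a_t_c", "b_u_d", "xx"], some "a", some "t")

def Spec_extract_and_filter (celltypes : List String) (assay_filter : Option String) (tissue_filter : Option String) (out : List String × List String × List String) : Prop := out = extract_and_filter_alt celltypes assay_filter tissue_filter
instance (celltypes : List String) (assay_filter : Option String) (tissue_filter : Option String) (out : List String × List String × List String) : Decidable (Spec_extract_and_filter celltypes assay_filter tissue_filter out) := by unfold Spec_extract_and_filter; infer_instance

-- ===== CLAIM (what is proved, stated in full; the proofs are below) =====
def Claim_equal_extract_and_filter : Prop := ∀ (celltypes : List String) (assay_filter : Option String) (tissue_filter : Option String), Dom_extract_and_filter celltypes assay_filter tissue_filter → Pre_extract_and_filter celltypes assay_filter tissue_filter → Spec_extract_and_filter celltypes assay_filter tissue_filter (extract_and_filter celltypes assay_filter tissue_filter)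

-- ===== LEMMAS AND PROOFS =====

-- one step of B's loop = one step of A's set loop plus the conditional append
theorem pvStepB_eq (assayOn tissueOn : Bool) (a t : String)
    (s1 s2 : PySem.Set String) (fl : List String) (ct : String) :
    pvStepB assayOn tissueOn a t (s1, s2, fl) ct =
      ((pvStepA (s1, s2) ct).1, (pvStepA (s1, s2) ct).2,
        fl ++ if pvKeep assayOn tissueOn a t ct then [ct] else []) := by
  unfold pvStepB pvStepA
  by_cases hk : pvKeep assayOn tissueOn a t ct = true <;>
    by_cases hl : 3 ≤ (pvSplitU ct).length <;> simp [hk, hl]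

-- B's fused loop, unrolled: the sets are A's fold, the filtered list is the kept elements
theorem pv_loop (assayOn tissueOn : Bool) (a t : String)
    (celltypes : List String) (s1 s2 : PySem.Set String) (fl : List String) :
    celltypes.foldl (pvStepB assayOn tissueOn a t) (s1, s2, fl) =
      ((celltypes.foldl pvStepA (s1, s2)).1, (celltypes.foldl pvStepA (s1, s2)).2,
        fl ++ celltypes.filter (pvKeep assayOn tissueOn a t)) := by
  induction celltypes generalizing s1 s2 fl with
  | nil => simp
  | cons c cs ih =>
    simp only [List.foldl_cons, List.filter_cons]
    rw [pvStepB_eq, ih]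
    by_cases hk : pvKeep assayOn tissueOn a t c = true <;> simp [hk]

-- ===== VERDICT (by name: the statement is the Claim_ definition above) =====
theorem extract_and_filter_spec : Claim_equal_extract_and_filter := by
  intro celltypes af tf _ _
  unfold Spec_extract_and_filter extract_and_filter extract_and_filter_alt
  rw [pv_loop]
  refine Prod.ext rfl (Prod.ext rfl ?_)
  simp only [List.nil_append]
  unfold pvKeep
  by_cases ha : pvAssayOn af = true <;> by_cases ht : pvTissueOn tf = true <;>
    simp [ha, ht]
  exact List.filter_congr fun x _ => Bool.and_comm _ _
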